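-- pv_equiv track=rewrite | github.com/TEAMLAB-Lecture/morsecode-jy1559 | morsecode.py | is_validated_morse_code
-- ===== SOURCE A (Python) =====
-- def get_morse_code_dict():
--     morse_code = {
--         "A": ".-", "N": "-.", "B": "-...", "O": "---", "C": "-.-.", "P": ".--.", "D": "-..", "Q": "--.-", "E": ".",
--         "R": ".-.", "F": "..-.", "S": "...", "G": "--.", "T": "-", "H": "....", "U": "..-", "I": "..", "V": "...-",
--         "K": "-.-", "X": "-..-", "J": ".---", "W": ".--", "L": ".-..", "Y": "-.--", "M": "--", "Z": "--.."
--     }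
--     return morse_code
--
-- def is_validated_morse_code(user_input):
--     morse = get_morse_code_dict()
--     one = ''
--     for x in ' '.join(user_input.split()):
--         if x != '-' and x != '.' and x != ' ' : return False
--         if x == ' ':
--             if one not in list(morse.values()): return False
--             one = ''
--         else: one += x
--     if one not in list(morse.values()): return False
--     return True
-- ===== SOURCE B (Python) =====
-- _NOT_A_LETTER = ("..--", ".-.-", "---.", "----")
--
-- def is_validated_morse_code(user_input):
--     # A token is a valid letter code iff it is 1-4 dots/dashes and not one of the
--     # four 4-symbol combinations that are not letters: no table needed.
--     tokens = user_input.split()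
--     if not tokens:
--         return False
--     for tok in tokens:
--         if not (1 <= len(tok) <= 4):
--             return False
--         if any(c != '.' and c != '-' for c in tok):
--             return False
--         if tok in _NOT_A_LETTER:
--             return False
--     return True
-- ===== Notes on version B (the rewrite author's own statement) =====
-- stated objective: alternative
-- what changed: Replaces A's per-character state machine over the space-joined split (with an accumulator and repeated list(morse.values()) scans) by tokenising once and validating each token with a closed-form rule -- 1-4 dots/dashes and not one of the four 4-symbol non-letter combinations -- so the code table disappears entirely.
import Mathlib
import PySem

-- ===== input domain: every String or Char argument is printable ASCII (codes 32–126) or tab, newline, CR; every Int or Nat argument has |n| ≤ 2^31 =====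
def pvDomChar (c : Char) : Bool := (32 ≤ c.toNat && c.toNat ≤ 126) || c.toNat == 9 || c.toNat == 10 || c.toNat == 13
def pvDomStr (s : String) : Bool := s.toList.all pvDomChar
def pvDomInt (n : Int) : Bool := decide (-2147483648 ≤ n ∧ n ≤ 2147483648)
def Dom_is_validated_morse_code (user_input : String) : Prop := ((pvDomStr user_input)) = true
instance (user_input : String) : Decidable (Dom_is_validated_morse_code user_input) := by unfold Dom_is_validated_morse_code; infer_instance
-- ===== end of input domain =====

-- B drops the code table entirely: it tokenises once with split() and accepts a token iff
-- it is 1-4 dots/dashes and not one of the four 4-symbol combinations that are not letters;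
-- objective: alternative (closed-form characterisation instead of A's per-character state
-- machine with repeated scans of the value list).


-- ===== PORT A =====
-- shared module helper: the literal dict from the Python module (used only by A)
def get_morse_code_dict : PySem.Dict String String :=
  PySem.Dict.ofList [("A", ".-"), ("N", "-."), ("B", "-..."), ("O", "---"), ("C", "-.-."),
    ("P", ".--."), ("D", "-.."), ("Q", "--.-"), ("E", "."), ("R", ".-."), ("F", "..-."),
    ("S", "..."), ("G", "--."), ("T", "-"), ("H", "...."), ("U", "..-"), ("I", ".."),
    ("V", "...-"), ("K", "-.-"), ("X", "-..-"), ("J", ".---"), ("W", ".--"), ("L", ".-.."),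
    ("Y", "-.--"), ("M", "--"), ("Z", "--..")]

-- A's for-loop over the characters of ' '.join(user_input.split()), with the 'one'
-- accumulator and the early returns; strings are compared at the char-list level (exact).
def morseGo (vals : List (List Char)) : List Char → List Char → Bool
  | [], one => decide (one ∈ vals)
  | x :: rest, one =>
    if x ≠ '-' ∧ x ≠ '.' ∧ x ≠ ' ' then false
    else if x = ' ' then
      if one ∉ vals then false else morseGo vals rest []
    else morseGo vals rest (one ++ [x])

def is_validated_morse_code (user_input : String) : Bool :=
  let morse := get_morse_code_dict
  morseGo (morse.values.map String.toList)
    (PySem.Chars.join [' '] (PySem.Chars.split₀ user_input.toList)) []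

-- ===== PORT B =====
-- the four 4-symbol dot/dash strings that are not letter codes
def pvNotALetter : List (List Char) :=
  [['.', '.', '-', '-'], ['.', '-', '.', '-'], ['-', '-', '-', '.'], ['-', '-', '-', '-']]

-- per-token test of B: 1 ≤ len ≤ 4, only dots/dashes, not one of the four exceptions
def isCode (tok : List Char) : Bool :=
  if ¬ (1 ≤ tok.length ∧ tok.length ≤ 4) then false
  else if tok.any (fun c => c ≠ '.' && c ≠ '-') then false
  else if pvNotALetter.contains tok then false
  else true

def is_validated_morse_code_alt (user_input : String) : Bool :=
  let tokens := PySem.Chars.split₀ user_input.toList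
  if tokens.isEmpty then false
  else tokens.all isCode

-- ===== PRECONDITION & SPEC =====
def Spec_is_validated_morse_code (user_input : String) (out : Bool) : Prop := out = is_validated_morse_code_alt user_input
instance (user_input : String) (out : Bool) : Decidable (Spec_is_validated_morse_code user_input out) := by unfold Spec_is_validated_morse_code; infer_instance

-- ===== CLAIM (what is proved, stated in full; the proofs are below) =====
def Claim_equal_is_validated_morse_code : Prop := ∀ (user_input : String), Dom_is_validated_morse_code user_input → Spec_is_validated_morse_code user_input (is_validated_morse_code user_input)

-- ===== LEMMAS AND PROOFS =====

-- all dot/dash strings of length ≤ n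
def codes : Nat → List (List Char)
  | 0 => [[]]
  | n + 1 => [] :: (['-', '.'].flatMap (fun c => (codes n).map (c :: ·)))

lemma mem_codes (n : Nat) : ∀ tok : List Char,
    tok ∈ codes n ↔ tok.length ≤ n ∧ ∀ c ∈ tok, c = '-' ∨ c = '.' := by
  induction n with
  | zero => intro tok; cases tok <;> simp [codes]
  | succ n ih =>
    intro tok
    cases tok with
    | nil => simp [codes]
    | cons a t =>
      simp only [codes, List.mem_cons, List.mem_flatMap, List.mem_map]
      constructor
      · rintro (h | ⟨c, hc, t', ht', heq⟩)
        · exact absurd h (by simp)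
        · obtain ⟨rfl, rfl⟩ : c = a ∧ t' = t := by
            exact ⟨(List.cons.injEq _ _ _ _ ▸ heq).1, (List.cons.injEq _ _ _ _ ▸ heq).2⟩
          have := (ih t').mp ht'
          refine ⟨by simpa using this.1, ?_⟩
          intro d hd
          rcases hd with rfl | hd
          · simpa using hc
          · exact this.2 d hd
      · rintro ⟨hlen, hchars⟩
        right
        refine ⟨a, ?_, t, (ih t).mpr ⟨by simpa using hlen, fun d hd => hchars d (Or.inr hd)⟩, rfl⟩
        simpa using hchars a (by simp)

def goodList : List (List Char) :=
  (codes 4).filter (fun t => !t.isEmpty && !pvNotALetter.contains t)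

-- the 26 code values and goodList have the same members (both are closed literals)
lemma vals_incl :
    ((get_morse_code_dict.values.map String.toList).all (fun t => goodList.contains t)
      && goodList.all (fun t => (get_morse_code_dict.values.map String.toList).contains t)) = true := by
  decide

lemma mem_vals_iff_goodList (tok : List Char) :
    tok ∈ get_morse_code_dict.values.map String.toList ↔ tok ∈ goodList := by
  have h := vals_incl
  rw [Bool.and_eq_true, List.all_eq_true, List.all_eq_true] at h
  constructor
  · intro hm
    have := h.1 tok hm
    exact List.contains_iff_mem.mp this
  · intro hm
    have := h.2 tok hm
    exact List.contains_iff_mem.mp this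

-- the closed-form test agrees with membership in the code table
lemma isCode_eq_mem (tok : List Char) :
    isCode tok = decide (tok ∈ get_morse_code_dict.values.map String.toList) := by
  rw [Bool.eq_iff_iff, decide_eq_true_iff, mem_vals_iff_goodList, goodList, List.mem_filter,
    mem_codes]
  unfold isCode
  constructor
  · intro h
    split_ifs at h with h1 h2 h3
    refine ⟨⟨h1.2, ?_⟩, ?_⟩
    · intro c hc
      have : ¬ (c ≠ '.' && c ≠ '-') = true := fun hb => h2 (List.any_eq_true.mpr ⟨c, hc, hb⟩)
      simp only [Bool.and_eq_true, decide_eq_true_iff, not_and_or, not_not] at this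
      tauto
    · have hne : tok ≠ [] := by
        intro h0; rw [h0] at h1; simp at h1
      simp [hne]
      exact fun hm => h3 (List.contains_iff_mem.mpr hm)
  · rintro ⟨⟨hlen, hchars⟩, hb⟩
    rw [Bool.and_eq_true, Bool.not_eq_true', Bool.not_eq_true'] at hb
    have hne : tok ≠ [] := by
      intro h0; rw [h0] at hb; simp at hb
    have h1 : 1 ≤ tok.length ∧ tok.length ≤ 4 :=
      ⟨List.length_pos_of_ne_nil hne, hlen⟩
    rw [if_neg (by exact fun h => h h1)]
    have h2 : tok.any (fun c => c ≠ '.' && c ≠ '-') = false := by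
      rw [List.any_eq_false]
      intro c hc
      rcases hchars c hc with rfl | rfl <;> decide
    rw [h2, if_neg (by simp), hb.2, if_neg (by simp)]

-- every valid morse code consists of '-' and '.' only, and none is empty
lemma morse_vals_all_bool :
    (get_morse_code_dict.values.map String.toList).all
      (fun v => v.all (fun c => c == '-' || c == '.')) = true := by rfl

lemma morse_vals_chars :
    ∀ v ∈ get_morse_code_dict.values.map String.toList, ∀ c ∈ v, c = '-' ∨ c = '.' := by
  have h := morse_vals_all_bool
  rw [List.all_eq_true] at h
  intro v hv c hc
  have h2 := h v hv
  rw [List.all_eq_true] at h2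
  simpa using h2 c hc

lemma morse_vals_contains_nil :
    (get_morse_code_dict.values.map String.toList).contains ([] : List Char) = false := by rfl

lemma morse_vals_ne_nil : ([] : List Char) ∉ get_morse_code_dict.values.map String.toList := by
  intro hmem
  have h := morse_vals_contains_nil
  rw [List.contains_eq_mem] at h
  exact absurd hmem (of_decide_eq_false h)

-- words produced by split() contain no whitespace characters
lemma split₀_go_no_ws (s cur : List Char) (acc : List (List Char))
    (hacc : ∀ w ∈ acc, ∀ c ∈ w, PySem.Chars.isspace c = false)
    (hcur : ∀ c ∈ cur, PySem.Chars.isspace c = false) :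
    ∀ w ∈ PySem.Chars.split₀.go s cur acc, ∀ c ∈ w, PySem.Chars.isspace c = false := by
  induction s generalizing cur acc with
  | nil =>
    intro w hw
    simp only [PySem.Chars.split₀.go] at hw
    split at hw
    · exact hacc w (List.mem_reverse.mp hw)
    · rw [List.mem_reverse, List.mem_cons] at hw
      rcases hw with hw | hw
      · subst hw; intro c hc; exact hcur c (List.mem_reverse.mp hc)
      · exact hacc w hw
  | cons x xs ih =>
    simp only [PySem.Chars.split₀.go]
    by_cases hx : PySem.Chars.isspace x = true
    · rw [if_pos hx]
      by_cases hc : cur.isEmpty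
      · rw [if_pos hc]
        exact ih [] acc hacc (by simp)
      · rw [if_neg hc]
        refine ih [] (cur.reverse :: acc) ?_ (by simp)
        intro w hw
        rw [List.mem_cons] at hw
        rcases hw with hw | hw
        · subst hw; intro c hcm; exact hcur c (List.mem_reverse.mp hcm)
        · exact hacc w hw
    · rw [if_neg hx]
      refine ih (x :: cur) acc hacc ?_
      intro c hcm
      rw [List.mem_cons] at hcm
      rcases hcm with hcm | hcm
      · subst hcm; exact eq_false_of_ne_true hx
      · exact hcur c hcm

lemma split₀_no_space (s : List Char) :
    ∀ w ∈ PySem.Chars.split₀ s, ∀ c ∈ w, c ≠ ' ' := by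
  intro w hw c hc hcontra
  have := split₀_go_no_ws s [] [] (by simp) (by simp) w hw c hc
  rw [hcontra] at this
  exact absurd this (by decide)

-- processing one space-free word with morseGo: check its characters, then continue with it appended
lemma morseGo_word (vals : List (List Char)) (w rest one : List Char)
    (hw : ∀ c ∈ w, c ≠ ' ') :
    morseGo vals (w ++ rest) one =
      if ∀ c ∈ w, c = '-' ∨ c = '.' then morseGo vals rest (one ++ w) else false := by
  induction w generalizing one with
  | nil => simp
  | cons c w ih =>
    have hc : c ≠ ' ' := hw c (by simp)
    by_cases hok : c = '-' ∨ c = '.'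
    · have h1 : ¬(c ≠ '-' ∧ c ≠ '.' ∧ c ≠ ' ') := by tauto
      have h2 : c ≠ ' ' := hc
      simp only [List.cons_append, morseGo, if_neg h1, if_neg h2]
      rw [ih (one ++ [c]) (fun d hd => hw d (List.mem_cons_of_mem _ hd))]
      have : (∀ d ∈ c :: w, d = '-' ∨ d = '.') ↔ (∀ d ∈ w, d = '-' ∨ d = '.') := by
        simp [hok]
      by_cases hall : ∀ d ∈ w, d = '-' ∨ d = '.'
      · rw [if_pos hall, if_pos (this.mpr hall)]
        simp
      · rw [if_neg hall, if_neg (fun h => hall (this.mp h))]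
    · have h1 : c ≠ '-' ∧ c ≠ '.' ∧ c ≠ ' ' := by tauto
      simp only [List.cons_append, morseGo, if_pos h1]
      rw [if_neg (fun h => hok (h c (by simp)))]

-- a word with an invalid character is not a morse code
lemma not_mem_vals_of_bad (vals : List (List Char))
    (hvals : ∀ v ∈ vals, ∀ c ∈ v, c = '-' ∨ c = '.')
    (w : List Char) (hbad : ¬ ∀ c ∈ w, c = '-' ∨ c = '.') : w ∉ vals := by
  intro hmem
  exact hbad (hvals w hmem)

-- the state machine over ' '.join(ws) decides exactly "ws nonempty and every word a code"
lemma morseGo_join (vals : List (List Char))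
    (hvals : ∀ v ∈ vals, ∀ c ∈ v, c = '-' ∨ c = '.')
    (hnil : ([] : List Char) ∉ vals) :
    ∀ ws : List (List Char), (∀ w ∈ ws, ∀ c ∈ w, c ≠ ' ') →
      morseGo vals (PySem.Chars.join [' '] ws) [] =
        (!ws.isEmpty && ws.all (fun w => decide (w ∈ vals))) := by
  intro ws
  induction ws with
  | nil => intro _; simp [PySem.Chars.join_nil, morseGo, hnil]
  | cons w ws ih =>
    intro hws
    have hw : ∀ c ∈ w, c ≠ ' ' := hws w (by simp)
    cases ws with
    | nil =>
      have hj : PySem.Chars.join [' '] [w] = w ++ [] := by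
        rw [PySem.Chars.join_singleton, List.append_nil]
      rw [hj, morseGo_word vals w [] [] hw]
      by_cases hok : ∀ c ∈ w, c = '-' ∨ c = '.'
      · simp [morseGo, decide_eq_true hok]
      · have : w ∉ vals := not_mem_vals_of_bad vals hvals w hok
        simp [hok, this]
    | cons w' rest =>
      have hj : PySem.Chars.join [' '] (w :: w' :: rest) =
          w ++ (' ' :: PySem.Chars.join [' '] (w' :: rest)) := by
        rw [PySem.Chars.join_cons_cons, List.append_assoc]; rfl
      rw [hj, morseGo_word vals w _ [] hw]
      have hrec := ih (fun v hv => hws v (List.mem_cons_of_mem _ hv))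
      by_cases hok : ∀ c ∈ w, c = '-' ∨ c = '.'
      · rw [if_pos hok]
        simp only [List.nil_append]
        by_cases hmem : w ∈ vals
        · have hstep : morseGo vals (' ' :: PySem.Chars.join [' '] (w' :: rest)) w =
              morseGo vals (PySem.Chars.join [' '] (w' :: rest)) [] := by
            simp [morseGo, hmem]
          rw [hstep, hrec]
          simp [hmem]
        · have hstep : morseGo vals (' ' :: PySem.Chars.join [' '] (w' :: rest)) w = false := by
            simp [morseGo, hmem]
          rw [hstep]
          simp [hmem]
      · rw [if_neg hok]
        have : w ∉ vals := not_mem_vals_of_bad vals hvals w hok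
        simp [this]

-- ===== VERDICT (by name: the statement is the Claim_ definition above) =====
theorem is_validated_morse_code_spec : Claim_equal_is_validated_morse_code := by
  intro user_input _
  unfold Spec_is_validated_morse_code is_validated_morse_code is_validated_morse_code_alt
  simp only []
  rw [morseGo_join _ morse_vals_chars morse_vals_ne_nil _ (split₀_no_space user_input.toList)]
  cases h : (PySem.Chars.split₀ user_input.toList).isEmpty
  · simp only [Bool.not_false, Bool.true_and]
    refine List.all_congr rfl (fun tok => ?_)
    exact (isCode_eq_mem tok).symm
  · simp
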